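-- pv_equiv track=rewrite | github.com/IsaacG/Advent-of-Code | advent_of_code/2017/d20.py | solve
-- ===== SOURCE A (Python) =====
-- import collections
--
-- def distance(vals: tuple[int, ...]) -> int:
--     """Return the Manhatten distance of a coordinate."""
--     return sum(abs(i) for i in vals)
--
-- def solve(data: list[list[int]], part: int) -> int:
--     """Return particle metadata.
--
--     Part one: return which particle will be farthest from the origin.
--     Part two: return the number of particles after collisions.
--     """
--     pos, vel, acc = [
--         {idx: tuple(vals[i * 3:(i + 1) * 3]) for idx, vals in enumerate(data)}
--         for i in range(3)
--     ]
--     # Simulate some ticks for collision removal. 40 is the min that works for my input.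
--     for _ in range(0 if part == 1 else 100):
--         # Count positions. Any position with multiple particles is a collision.
--         counts = collections.Counter(pos.values())
--         collisions = {p for p, count in counts.items() if count > 1}
--         # Remove particles which collided.
--         pos = {idx: p for idx, p in pos.items() if p not in collisions}
--         vel = {idx: v for idx, v in vel.items() if idx in pos}
--         # Update velocity then position.
--         vel = {idx: tuple(vel[idx][dim] + acc[idx][dim] for dim in range(3)) for idx in pos}
--         pos = {idx: tuple(pos[idx][dim] + vel[idx][dim] for dim in range(3)) for idx in pos}
--
--     if part == 2:
--         return len(pos)
--     # Sort remaining particles by acceleration then velocity (Manhatten distance).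
--     slowest = sorted((distance(acc[idx]), distance(vel[idx]), idx) for idx in pos)
--     return slowest[0][2]
-- ===== SOURCE B (Python) =====
-- import collections
--
--
-- def manhattan(vals):
--     """Manhattan distance of a coordinate."""
--     return sum(abs(x) for x in vals)
--
--
-- def position(row, t):
--     """Closed-form position after t ticks: p + t*v + t*(t+1)//2 * a."""
--     return tuple(row[d] + t * row[3 + d] + t * (t + 1) // 2 * row[6 + d]
--                  for d in range(3))
--
--
-- def solve(data, part):
--     """Return particle metadata.
--
--     Part one: return which particle will be farthest from the origin.
--     Part two: return the number of particles after collisions.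
--     """
--     if part == 1:
--         # No ticks are simulated for part one: pick the particle with the
--         # smallest (|acc|, |vel|, idx) directly.
--         return min((manhattan(row[6:9]), manhattan(row[3:6]), i)
--                    for i, row in enumerate(data))[2]
--     # Positions are a pure function of (particle, tick), so no state is ever
--     # updated: each of the 100 ticks just filters the live indices by
--     # closed-form position collisions.
--     alive = list(range(len(data)))
--     for t in range(100):
--         counts = collections.Counter(position(data[i], t) for i in alive)
--         alive = [i for i in alive if counts[position(data[i], t)] == 1]
--     return len(alive)
-- ===== Notes on version B (the rewrite author's own statement) =====
-- stated objective: alternative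
-- what changed: B drops A's incremental state simulation entirely: instead of rebuilding velocity/position dicts each tick, the position after t ticks is computed by the kinematic closed form p + t*v + t*(t+1)/2*a, so the 100 collision ticks only filter a list of live indices against closed-form positions, and part 1 takes a direct minimum of (|acc|,|vel|,idx) instead of simulating zero ticks over three dicts and sorting.
-- outside the precondition, e.g. on solve([[0, 0, 0, 0, 0, 0, 0, 0, 0]], 3): A returns 0, B returns 1; on solve([[0, 0, 0], [0, 0, 0]], 2): A returns 0, B raises IndexError
import Mathlib
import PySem

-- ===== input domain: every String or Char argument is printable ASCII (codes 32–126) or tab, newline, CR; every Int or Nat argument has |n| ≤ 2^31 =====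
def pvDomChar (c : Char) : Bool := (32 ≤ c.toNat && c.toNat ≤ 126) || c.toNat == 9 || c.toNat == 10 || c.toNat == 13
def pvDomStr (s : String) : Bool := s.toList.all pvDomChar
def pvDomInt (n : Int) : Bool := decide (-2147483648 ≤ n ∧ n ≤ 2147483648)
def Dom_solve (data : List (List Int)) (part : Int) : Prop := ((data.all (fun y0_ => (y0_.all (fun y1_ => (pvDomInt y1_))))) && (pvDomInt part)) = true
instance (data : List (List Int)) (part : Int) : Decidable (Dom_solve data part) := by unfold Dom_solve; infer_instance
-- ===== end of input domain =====

-- B replaces A's incremental per-tick simulation (three index-keyed dicts whose velocities and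
-- positions are rebuilt every tick) by the kinematic closed form p + t*v + t*(t+1)/2*a: no
-- particle state is updated, each tick only filters a list of live indices, and part 1 takes a
-- direct minimum instead of sorting (objective: alternative).


-- ===== PORT A =====

-- sum(abs(i) for i in vals)
def distance (vals : List Int) : Int := (vals.map (fun i => |i|)).sum

-- Python's lexicographic '<' on int 3-tuples, written out because Mathlib's Prod '<' is pointwise
def lexLt3 (a b : Int × Int × Int) : Bool :=
  a.1 < b.1 || (a.1 == b.1 && (a.2.1 < b.2.1 || (a.2.1 == b.2.1 && a.2.2 < b.2.2)))

-- {idx: tuple(vals[i*3:(i+1)*3]) for idx, vals in enumerate(data)}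
def mkd (data : List (List Int)) (i : Int) : PySem.Dict Int (List Int) :=
  (PySem.List.enumerate data).foldl
    (fun d p => d.insert p.1 (PySem.List.slice p.2 (some (i * 3)) (some ((i + 1) * 3))))
    (PySem.Dict.mk [])

-- one iteration of A's `for _ in range(...)` body; dict accesses pos[idx]/vel[idx]/acc[idx] and
-- tuple accesses [dim] are total forms (getD/pyGetD) — under Pre_solve every key/index is present
def tickA (acc : PySem.Dict Int (List Int))
    (s : PySem.Dict Int (List Int) × PySem.Dict Int (List Int)) :
    PySem.Dict Int (List Int) × PySem.Dict Int (List Int) :=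
  let counts := PySem.Dict.counter s.1.values
  let collisions := counts.items.foldl
    (fun c p => if p.2 > 1 then PySem.Set.add c p.1 else c) PySem.Set.empty
  let pos1 := s.1.items.foldl
    (fun d p => if PySem.Set.contains collisions p.2 then d else d.insert p.1 p.2) (PySem.Dict.mk [])
  let vel1 := s.2.items.foldl
    (fun d p => if pos1.contains p.1 then d.insert p.1 p.2 else d) (PySem.Dict.mk [])
  let vel2 := pos1.keys.foldl
    (fun d idx => d.insert idx ((PySem.List.pyRange 0 3 1).map
      (fun dim => PySem.List.pyGetD (vel1.getD idx []) dim 0 + PySem.List.pyGetD (acc.getD idx []) dim 0)))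
    (PySem.Dict.mk [])
  let pos2 := pos1.keys.foldl
    (fun d idx => d.insert idx ((PySem.List.pyRange 0 3 1).map
      (fun dim => PySem.List.pyGetD (pos1.getD idx []) dim 0 + PySem.List.pyGetD (vel2.getD idx []) dim 0)))
    (PySem.Dict.mk [])
  (pos2, vel2)

def solve (data : List (List Int)) (part : Int) : Int :=
  let pos0 := mkd data 0
  let vel0 := mkd data 1
  let acc := mkd data 2
  let st := (PySem.List.pyRange 0 (if part = 1 then 0 else 100) 1).foldl
    (fun s _ => tickA acc s) (pos0, vel0)
  if part = 2 then (PySem.Dict.size st.1 : Int)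
  else
    -- sorted(...) over 3-tuples: the foldl-insertBy form of PySem.List.sorted
    -- (sorted_eq_foldl_insertBy), with Python's lexicographic tuple '<' written out
    let slowest := (st.1.keys.map
        (fun idx => (distance (acc.getD idx []), distance (st.2.getD idx []), idx))).foldl
      (fun ac x => PySem.List.insertBy lexLt3 x ac) []
    -- slowest[0][2]; index 0 in total form — under Pre_solve the list is nonempty
    (PySem.List.pyGetD slowest 0 (0, 0, 0)).2.2

-- ===== PORT B =====

-- sum(abs(x) for x in vals)
def manhattan (vals : List Int) : Int := (vals.map (fun x => |x|)).sum

-- position(row, t): closed-form coordinates after t ticks, p + t*v + t*(t+1)//2 * a;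
-- row[d] in total form (pyGetD) — under Pre_solve every index is present
def positionAt (row : List Int) (t : Int) : List Int :=
  (PySem.List.pyRange 0 3 1).map (fun d =>
    PySem.List.pyGetD row d 0 + t * PySem.List.pyGetD row (3 + d) 0
      + PySem.Int.floordiv (t * (t + 1)) 2 * PySem.List.pyGetD row (6 + d) 0)

-- one tick: filter the live indices by closed-form position collisions
def tickB (data : List (List Int)) (t : Int) (alive : List Int) : List Int :=
  let counts := PySem.Dict.counter
    (alive.map (fun i => positionAt (PySem.List.pyGetD data i []) t))
  alive.filter (fun i => counts.getD (positionAt (PySem.List.pyGetD data i []) t) 0 == 1)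

def solve_alt (data : List (List Int)) (part : Int) : Int :=
  if part = 1 then
    -- min(...)[2]: fold keeping the FIRST minimum under Python's lexicographic tuple '<'
    -- ([] is unreachable under Pre_solve: Python's min raises there)
    (match (PySem.List.enumerate data).map (fun p : Int × List Int =>
        (manhattan (PySem.List.slice p.2 (some 6) (some 9)),
         manhattan (PySem.List.slice p.2 (some 3) (some 6)), p.1)) with
      | [] => ((0 : Int), (0 : Int), (0 : Int))
      | x :: tl => tl.foldl (fun b y => if lexLt3 y b then y else b) x).2.2
  else
    ((PySem.List.pyRange 0 100 1).foldl (fun al t => tickB data t al)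
      (PySem.List.pyRange 0 (data.length : Int) 1)).length

-- ===== PRECONDITION & SPEC =====

-- Pre_ restricts part to 1 and 2 — the only parts the puzzle defines; for other part values
-- whether A terminates without an IndexError depends on the whole simulation (the final sorted
-- list may be empty) and is not a closed-form condition. Part 1 needs a nonempty list (A indexes
-- sorted(...)[0]); part 2 needs each row to carry all 9 coordinates (A indexes vel/acc/pos[dim]
-- for dim in range(3) each tick) — A returns on a few shorter-row inputs only when every
-- particle happens to collide away first.
def Pre_solve (data : List (List Int)) (part : Int) : Prop :=
  (part = 1 ∧ data ≠ []) ∨ (part = 2 ∧ ∀ row ∈ data, 9 ≤ row.length)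
instance (data : List (List Int)) (part : Int) : Decidable (Pre_solve data part) := by
  unfold Pre_solve; infer_instance

def pvWitness_solve : List (List Int) × Int :=
  ([[3, 0, 0, 0, 0, 0, 0, 0, 0], [0, 0, 0, 1, 0, 0, 0, 0, 0]], 2)

def Spec_solve (data : List (List Int)) (part : Int) (out : Int) : Prop := out = solve_alt data part
instance (data : List (List Int)) (part : Int) (out : Int) : Decidable (Spec_solve data part out) := by
  unfold Spec_solve; infer_instance

-- ===== CLAIM (what is proved, stated in full; the proofs are below) =====
def Claim_equal_solve : Prop := ∀ (data : List (List Int)) (part : Int),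
  Dom_solve data part → Pre_solve data part → Spec_solve data part (solve data part)

-- ===== LEMMAS AND PROOFS =====

-- proof-only abbreviations: closed-form position/velocity of particle i at tick t
def Pfun (data : List (List Int)) (t : Int) (i : Int) : List Int :=
  positionAt (PySem.List.pyGetD data i []) t

def velA (row : List Int) (t : Int) : List Int :=
  (PySem.List.pyRange 0 3 1).map (fun d =>
    PySem.List.pyGetD row (3 + d) 0 + t * PySem.List.pyGetD row (6 + d) 0)

def Vfun (data : List (List Int)) (t : Int) (i : Int) : List Int :=
  velA (PySem.List.pyGetD data i []) t

-- the simulation relation between A's (pos, vel) dict pair after t ticks and B's live-index list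
def SimInv (data : List (List Int)) (t : Int) (alive : List Int)
    (s : PySem.Dict Int (List Int) × PySem.Dict Int (List Int)) : Prop :=
  alive.Nodup ∧
  (∀ i ∈ alive, 0 ≤ i ∧ i < (data.length : Int)) ∧
  s.1 = PySem.Dict.mk (alive.map (fun i => (i, Pfun data t i))) ∧
  s.2 = PySem.Dict.mk (alive.map (fun i => (i, Vfun data t i)))

theorem lexLt3_trans {a b c : Int × Int × Int} (h1 : lexLt3 a b = true) (h2 : lexLt3 b c = true) :
    lexLt3 a c = true := by
  obtain ⟨a1, a2, a3⟩ := a; obtain ⟨b1, b2, b3⟩ := b; obtain ⟨c1, c2, c3⟩ := c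
  simp only [lexLt3, Bool.or_eq_true, Bool.and_eq_true, decide_eq_true_eq, beq_iff_eq] at *
  omega

theorem lexLt3_le_trans {a b c : Int × Int × Int} (h1 : lexLt3 a b = false)
    (h2 : lexLt3 a c = true) : lexLt3 b c = true := by
  obtain ⟨a1, a2, a3⟩ := a; obtain ⟨b1, b2, b3⟩ := b; obtain ⟨c1, c2, c3⟩ := c
  simp only [lexLt3, Bool.or_eq_true, Bool.and_eq_true, decide_eq_true_eq, beq_iff_eq,
    Bool.or_eq_false_iff, Bool.and_eq_false_iff, decide_eq_false_iff_not,
    beq_eq_false_iff_ne, ne_eq, not_lt] at *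
  omega

theorem lexLt3_antisymm {a b : Int × Int × Int} (h1 : lexLt3 a b = false)
    (h2 : lexLt3 b a = false) : a = b := by
  obtain ⟨a1, a2, a3⟩ := a; obtain ⟨b1, b2, b3⟩ := b
  simp only [lexLt3, Bool.or_eq_false_iff, Bool.and_eq_false_iff, decide_eq_false_iff_not,
    beq_eq_false_iff_ne, ne_eq, not_lt] at *
  simp only [Prod.mk.injEq]
  omega

theorem lexLt3_asymm {a b : Int × Int × Int} (h1 : lexLt3 a b = true) : lexLt3 b a = false := by
  obtain ⟨a1, a2, a3⟩ := a; obtain ⟨b1, b2, b3⟩ := b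
  simp only [lexLt3, Bool.or_eq_true, Bool.and_eq_true, decide_eq_true_eq, beq_iff_eq,
    Bool.or_eq_false_iff, Bool.and_eq_false_iff, decide_eq_false_iff_not,
    beq_eq_false_iff_ne, ne_eq, not_lt] at *
  omega

theorem lexLt3_irrefl (a : Int × Int × Int) : lexLt3 a a = false := by
  obtain ⟨a1, a2, a3⟩ := a
  simp [lexLt3]

def lexLe (a b : Int × Int × Int) : Prop := lexLt3 b a = false

theorem insertBy_pairwise (x : Int × Int × Int) (l : List (Int × Int × Int))
    (h : l.Pairwise lexLe) : (PySem.List.insertBy lexLt3 x l).Pairwise lexLe := by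
  induction l with
  | nil => simp [PySem.List.insertBy, lexLe, List.pairwise_cons]
  | cons y t ih =>
    rw [List.pairwise_cons] at h
    by_cases hxy : lexLt3 x y = true
    · simp only [PySem.List.insertBy, hxy, if_pos]
      refine List.Pairwise.cons ?_ (List.Pairwise.cons h.1 h.2)
      intro z hz
      rw [List.mem_cons] at hz
      show lexLt3 z x = false
      rcases hz with rfl | hz
      · exact lexLt3_asymm hxy
      · have hyz : lexLt3 z y = false := h.1 z hz
        by_cases hzx : lexLt3 z x = true
        · rw [lexLt3_trans hzx hxy] at hyz; exact absurd hyz (by simp)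
        · exact Bool.eq_false_iff.mpr hzx
    · simp only [PySem.List.insertBy, hxy, if_neg, Bool.false_eq_true, not_false_iff]
      refine List.Pairwise.cons ?_ (ih h.2)
      intro z hz
      rw [PySem.List.mem_insertBy] at hz
      rcases hz with rfl | hz
      · show lexLt3 z y = false
        exact Bool.eq_false_iff.mpr hxy
      · exact h.1 z hz

theorem mem_foldl_insertBy (L acc : List (Int × Int × Int)) (y : Int × Int × Int) :
    y ∈ L.foldl (fun ac x => PySem.List.insertBy lexLt3 x ac) acc ↔ y ∈ L ∨ y ∈ acc := by
  induction L generalizing acc with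
  | nil => simp
  | cons z t ih =>
    simp only [List.foldl_cons, ih, PySem.List.mem_insertBy, List.mem_cons]
    tauto

theorem pairwise_foldl_insertBy (L acc : List (Int × Int × Int)) (h : acc.Pairwise lexLe) :
    (L.foldl (fun ac x => PySem.List.insertBy lexLt3 x ac) acc).Pairwise lexLe := by
  induction L generalizing acc with
  | nil => exact h
  | cons z t ih => exact ih _ (insertBy_pairwise z acc h)

theorem foldmin_spec (t : List (Int × Int × Int)) (x : Int × Int × Int) :
    (t.foldl (fun b y => if lexLt3 y b then y else b) x) ∈ x :: t ∧
    ∀ y ∈ x :: t, lexLt3 y (t.foldl (fun b y => if lexLt3 y b then y else b) x) = false := by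
  induction t generalizing x with
  | nil =>
    refine ⟨by simp, ?_⟩
    intro y hy; rw [List.mem_singleton] at hy; subst hy; exact lexLt3_irrefl y
  | cons z t ih =>
    simp only [List.foldl_cons]
    obtain ⟨hmem, hmin⟩ := ih (if lexLt3 z x then z else x)
    constructor
    · rcases List.mem_cons.mp hmem with hh | hh
      · rw [hh]; split <;> simp
      · simp [hh]
    · intro y hy
      have hxm := hmin _ (List.mem_cons_self ..)
      rw [List.mem_cons, List.mem_cons] at hy
      rcases hy with rfl | rfl | hy
      · by_cases hzx : lexLt3 z y = true
        · rw [if_pos hzx] at hxm ⊢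
          by_cases hym : lexLt3 y (t.foldl (fun b y => if lexLt3 y b then y else b) z) = true
          · rw [lexLt3_trans hzx hym] at hxm; exact absurd hxm (by simp)
          · exact Bool.eq_false_iff.mpr hym
        · rw [if_neg hzx] at hxm ⊢; exact hxm
      · by_cases hyx : lexLt3 y x = true
        · rw [if_pos hyx] at hxm ⊢; exact hxm
        · rw [if_neg hyx] at hxm ⊢
          by_cases hym : lexLt3 y (t.foldl (fun b y => if lexLt3 y b then y else b) x) = true
          · rw [lexLt3_le_trans (Bool.eq_false_iff.mpr hyx) hym] at hxm
            exact absurd hxm (by simp)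
          · exact Bool.eq_false_iff.mpr hym
      · exact hmin y (by simp [hy])

theorem sort_head_eq_min (x : Int × Int × Int) (t : List (Int × Int × Int)) :
    PySem.List.pyGetD ((x :: t).foldl (fun ac y => PySem.List.insertBy lexLt3 y ac) []) 0 (0, 0, 0)
      = t.foldl (fun b y => if lexLt3 y b then y else b) x := by
  generalize hs : (x :: t).foldl (fun ac y => PySem.List.insertBy lexLt3 y ac) [] = s
  have hne : s ≠ [] := by
    intro hnil
    have := (mem_foldl_insertBy (x :: t) [] x).mpr (by simp)
    rw [hs, hnil] at this; exact absurd this (by simp)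
  obtain ⟨h, r, rfl⟩ := List.exists_cons_of_ne_nil hne
  rw [PySem.List.pyGetD_zero_cons]
  obtain ⟨hmem, hmin⟩ := foldmin_spec t x
  set m := t.foldl (fun b y => if lexLt3 y b then y else b) x with hm
  have hpw : (h :: r).Pairwise lexLe := by
    rw [← hs]; exact pairwise_foldl_insertBy _ [] (by simp)
  have hhmem : h ∈ x :: t := by
    have hh2 : h ∈ h :: r := List.mem_cons_self ..
    rw [← hs, mem_foldl_insertBy] at hh2
    rcases hh2 with hh | hh
    · exact hh
    · exact absurd hh (by simp)
  have hmmem : m ∈ h :: r := by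
    rw [← hs, mem_foldl_insertBy]; exact Or.inl hmem
  have hhm : lexLt3 h m = false := hmin h hhmem
  have hmh : lexLt3 m h = false := by
    rcases List.mem_cons.mp hmmem with hh | hh
    · rw [hh]; exact lexLt3_irrefl h
    · exact (List.pairwise_cons.mp hpw).1 m hh
  exact lexLt3_antisymm hhm hmh

theorem foldl_insert_keyed {α ν : Type} (key : α → Int) (val : α → ν) (f : α → Bool) :
    ∀ (l : List α) (init : List (Int × ν)),
      (∀ x ∈ l, key x ∉ init.map Prod.fst) → (l.map key).Nodup →
      l.foldl (fun d x => if f x then PySem.Dict.insert d (key x) (val x) else d)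
        (PySem.Dict.mk init)
        = PySem.Dict.mk (init ++ (l.filter f).map (fun x => (key x, val x))) := by
  intro l
  induction l with
  | nil => intro init _ _; simp
  | cons p t ih =>
    intro init hfresh hnd
    rw [List.map_cons, List.nodup_cons] at hnd
    have hnc : (PySem.Dict.mk init).contains (key p) = false := by
      rw [PySem.Dict.contains_eq_decide_mem_keys, decide_eq_false_iff_not, PySem.Dict.keys_mk]
      exact hfresh p (List.mem_cons_self ..)
    by_cases hf : f p = true
    · rw [List.foldl_cons, if_pos hf,
        show (PySem.Dict.mk init).insert (key p) (val p) = PySem.Dict.mk (init ++ [(key p, val p)]) from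
          PySem.Dict.ext ?eq]
      case eq => exact PySem.Dict.items_insert_of_not_contains _ _ hnc
      rw [ih (init ++ [(key p, val p)]) ?f1 hnd.2, List.filter_cons_of_pos hf]
      · simp
      case f1 =>
        intro x hx
        rw [List.map_append, List.mem_append]
        rintro (hh | hh)
        · exact hfresh x (List.mem_cons_of_mem _ hx) hh
        · simp only [List.map_cons, List.map_nil, List.mem_singleton] at hh
          exact hnd.1 (hh ▸ List.mem_map_of_mem hx)
    · rw [List.foldl_cons, if_neg hf, ih init ?f2 hnd.2,
        List.filter_cons_of_neg (by simpa using hf)]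
      case f2 => exact fun x hx => hfresh x (List.mem_cons_of_mem _ hx)

theorem foldl_insert_all {α ν : Type} (key : α → Int) (val : α → ν) (l : List α)
    (hnd : (l.map key).Nodup) :
    l.foldl (fun d x => PySem.Dict.insert d (key x) (val x)) (PySem.Dict.mk [])
      = PySem.Dict.mk (l.map (fun x => (key x, val x))) := by
  have htrue : (fun (d : PySem.Dict Int ν) (x : α) => d.insert (key x) (val x))
      = (fun d x => if (fun _ : α => true) x = true then d.insert (key x) (val x) else d) := by
    funext d x; simp
  rw [htrue, foldl_insert_keyed key val _ l [] (by simp) hnd]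
  simp

theorem contains_foldl_add_if {κ : Type} [BEq κ] [LawfulBEq κ]
    (L : List (κ × Int)) (v : κ) :
    ∀ (init : PySem.Set κ),
    PySem.Set.contains
      (L.foldl (fun c p => if p.2 > 1 then PySem.Set.add c p.1 else c) init) v
      = (init.contains v || L.any (fun p => decide (1 < p.2) && p.1 == v)) := by
  induction L with
  | nil => intro init; simp
  | cons p t ih =>
    intro init
    rw [List.foldl_cons]
    by_cases hp : (1:Int) < p.2
    · rw [if_pos (by simpa using hp), ih]
      simp only [List.any_cons, hp, decide_true, Bool.true_and]
      by_cases hv : p.1 == v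
      · simp only [hv, Bool.or_true, Bool.true_or, Bool.or_eq_true]
        left
        have : v ∈ PySem.Set.add init p.1 := by
          rw [PySem.Set.mem_add]
          exact Or.inr (beq_iff_eq.mp hv).symm
        simpa [PySem.Set.contains] using this
      · have : (PySem.Set.add init p.1).contains v = init.contains v := by
          have h1 : v ∈ PySem.Set.add init p.1 ↔ v ∈ init ∨ v = p.1 := PySem.Set.mem_add ..
          by_cases hvi : v ∈ init
          · simp only [PySem.Set.contains]
            simp [List.contains_eq_mem, hvi, h1.mpr (Or.inl hvi)]
          · simp only [PySem.Set.contains]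
            have : ¬ v ∈ PySem.Set.add init p.1 := by
              rw [h1]; rintro (hh | hh)
              · exact hvi hh
              · exact (by simpa using hv : ¬ p.1 = v) hh.symm
            simp [List.contains_eq_mem, hvi, this]
        rw [this]
        simp [hv]
    · rw [if_neg (by simpa using hp), ih]
      simp [hp]

theorem contains_collisions (xs : List (List Int)) (v : List Int) :
    PySem.Set.contains
      ((PySem.Dict.counter xs).items.foldl
        (fun c p => if p.2 > 1 then PySem.Set.add c p.1 else c) PySem.Set.empty) v
      = decide (1 < xs.count v) := by
  rw [contains_foldl_add_if, PySem.Dict.items_counter]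
  have hempty : PySem.Set.contains PySem.Set.empty v = false := by
    simp [PySem.Set.contains, PySem.Set.empty]
  rw [hempty, Bool.false_or, List.any_map]
  by_cases h : 1 < xs.count v
  · rw [decide_eq_true h, List.any_eq_true]
    refine ⟨v, ?_, by simpa using h⟩
    rw [PySem.Set.mem_ofList]
    exact List.count_pos_iff.mp (by omega)
  · rw [decide_eq_false h, List.any_eq_false]
    rintro k hk
    simp only [Function.comp, Bool.and_eq_true, decide_eq_true_eq, beq_iff_eq]
    rintro ⟨hc, rfl⟩
    exact h (by exact_mod_cast hc)

theorem mkd_eq (data : List (List Int)) (i : Int) :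
    mkd data i = PySem.Dict.mk ((PySem.List.enumerate data).map
      (fun p => (p.1, PySem.List.slice p.2 (some (i * 3)) (some ((i + 1) * 3))))) := by
  unfold mkd
  refine foldl_insert_all (fun p : Int × List Int => p.1)
    (fun p : Int × List Int => PySem.List.slice p.2 (some (i * 3)) (some ((i + 1) * 3))) _ ?_
  rw [show ((PySem.List.enumerate data).map (fun p : Int × List Int => p.1))
      = (PySem.List.enumerate data).map (·.1) from rfl]
  rw [PySem.List.map_fst_enumerate]
  exact PySem.List.nodup_pyRange_one _ _

-- nine-component destructuring of a row (Pre_solve part 2 gives 9 ≤ length)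
theorem exists_nine (row : List Int) (h : 9 ≤ row.length) :
    ∃ r0 r1 r2 r3 r4 r5 r6 r7 r8 rest,
      row = r0 :: r1 :: r2 :: r3 :: r4 :: r5 :: r6 :: r7 :: r8 :: rest := by
  match row, h with
  | r0 :: r1 :: r2 :: r3 :: r4 :: r5 :: r6 :: r7 :: r8 :: rest, _ =>
    exact ⟨r0, r1, r2, r3, r4, r5, r6, r7, r8, rest, rfl⟩

theorem positionAt_nine (r0 r1 r2 r3 r4 r5 r6 r7 r8 : Int) (rest : List Int) (t : Int) :
    positionAt (r0 :: r1 :: r2 :: r3 :: r4 :: r5 :: r6 :: r7 :: r8 :: rest) t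
      = [r0 + t * r3 + PySem.Int.floordiv (t * (t + 1)) 2 * r6,
         r1 + t * r4 + PySem.Int.floordiv (t * (t + 1)) 2 * r7,
         r2 + t * r5 + PySem.Int.floordiv (t * (t + 1)) 2 * r8] := by
  simp only [positionAt, show PySem.List.pyRange 0 3 1 = [0, 1, 2] from rfl, List.map_cons,
    List.map_nil]
  norm_num [PySem.List.pyGetD_ofNat']

theorem velA_nine (r0 r1 r2 r3 r4 r5 r6 r7 r8 : Int) (rest : List Int) (t : Int) :
    velA (r0 :: r1 :: r2 :: r3 :: r4 :: r5 :: r6 :: r7 :: r8 :: rest) t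
      = [r3 + t * r6, r4 + t * r7, r5 + t * r8] := by
  simp only [velA, show PySem.List.pyRange 0 3 1 = [0, 1, 2] from rfl, List.map_cons,
    List.map_nil]
  norm_num [PySem.List.pyGetD_ofNat']

theorem slice_nine (r0 r1 r2 r3 r4 r5 r6 r7 r8 : Int) (rest : List Int) :
    PySem.List.slice (r0 :: r1 :: r2 :: r3 :: r4 :: r5 :: r6 :: r7 :: r8 :: rest) (some 0) (some 3)
        = [r0, r1, r2] ∧
    PySem.List.slice (r0 :: r1 :: r2 :: r3 :: r4 :: r5 :: r6 :: r7 :: r8 :: rest) (some 3) (some 6)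
        = [r3, r4, r5] ∧
    PySem.List.slice (r0 :: r1 :: r2 :: r3 :: r4 :: r5 :: r6 :: r7 :: r8 :: rest) (some 6) (some 9)
        = [r6, r7, r8] := by
  refine ⟨?_, ?_, ?_⟩ <;>
    rw [PySem.List.slice_toNat _ (by norm_num) (by norm_num)] <;> rfl

-- triangular-number step: T t + (t+1) = T (t+1) with T t = t*(t+1)//2
theorem tri_step (t : Int) :
    PySem.Int.floordiv ((t + 1) * (t + 1 + 1)) 2
      = PySem.Int.floordiv (t * (t + 1)) 2 + (t + 1) := by
  rw [PySem.Int.floordiv_eq_ediv_of_pos (by norm_num),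
    PySem.Int.floordiv_eq_ediv_of_pos (by norm_num)]
  obtain ⟨k, hk⟩ := Int.even_mul_succ_self t
  have h2 : (t + 1) * (t + 1 + 1) = t * (t + 1) + 2 * (t + 1) := by ring
  omega

-- the per-tick velocity update applied to the closed forms is the next closed form
theorem vel_step (row : List Int) (h9 : 9 ≤ row.length) (t : Int) :
    (PySem.List.pyRange 0 3 1).map (fun dim =>
        PySem.List.pyGetD (velA row t) dim 0
          + PySem.List.pyGetD (PySem.List.slice row (some 6) (some 9)) dim 0)
      = velA row (t + 1) := by
  obtain ⟨r0, r1, r2, r3, r4, r5, r6, r7, r8, rest, rfl⟩ := exists_nine row h9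
  rw [velA_nine, velA_nine, (slice_nine r0 r1 r2 r3 r4 r5 r6 r7 r8 rest).2.2]
  simp only [show PySem.List.pyRange 0 3 1 = [0, 1, 2] from rfl, List.map_cons, List.map_nil]
  simp [PySem.List.pyGetD_ofNat']
  refine ⟨by ring, by ring, by ring⟩

-- the per-tick position update applied to the closed forms is the next closed form
theorem pos_step (row : List Int) (h9 : 9 ≤ row.length) (t : Int) :
    (PySem.List.pyRange 0 3 1).map (fun dim =>
        PySem.List.pyGetD (positionAt row t) dim 0
          + PySem.List.pyGetD (velA row (t + 1)) dim 0)
      = positionAt row (t + 1) := by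
  obtain ⟨r0, r1, r2, r3, r4, r5, r6, r7, r8, rest, rfl⟩ := exists_nine row h9
  rw [positionAt_nine, velA_nine, positionAt_nine, tri_step t]
  simp only [show PySem.List.pyRange 0 3 1 = [0, 1, 2] from rfl, List.map_cons, List.map_nil]
  simp [PySem.List.pyGetD_ofNat']
  refine ⟨by ring, by ring, by ring⟩

-- the row behind a live index is a data member (with all 9 coordinates under Pre_)
theorem rowOf_mem (data : List (List Int)) (i : Int) (h0 : 0 ≤ i) (hn : i < (data.length : Int)) :
    PySem.List.pyGetD data i [] ∈ data := by
  have hlt : i.toNat < data.length := by omega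
  rw [show i = (i.toNat : Int) by omega, PySem.List.pyGetD_natCast,
    List.getD_eq_getElem data [] hlt]
  exact List.getElem_mem hlt

-- (i, data[i]) is an entry of enumerate(data) for every in-range i
theorem mem_enumerate_rowOf (data : List (List Int)) (i : Int) (h0 : 0 ≤ i)
    (hn : i < (data.length : Int)) :
    (i, PySem.List.pyGetD data i []) ∈ PySem.List.enumerate data := by
  rw [PySem.List.enumerate_eq_map_pyRange data ([] : List Int)]
  refine List.mem_map.mpr ⟨i, ?_, rfl⟩
  rw [PySem.List.mem_pyRange_one]
  exact ⟨h0, by simpa [PySem.List.len] using hn⟩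

theorem keys_mkd_nodup (data : List (List Int)) (i : Int) : (mkd data i).keys.Nodup := by
  rw [mkd_eq, PySem.Dict.keys_mk, List.map_map]
  rw [show ((Prod.fst : Int × List Int → Int) ∘
      (fun p : Int × List Int => (p.1, PySem.List.slice p.2 (some (i * 3)) (some ((i + 1) * 3)))))
      = ((·.1) : Int × List Int → Int) from rfl]
  rw [PySem.List.map_fst_enumerate]
  exact PySem.List.nodup_pyRange_one _ _

-- acc[idx] as A reads it is the 6..9 slice of the idx-th row
theorem acc_getD (data : List (List Int)) (i : Int) (h0 : 0 ≤ i)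
    (hn : i < (data.length : Int)) :
    (mkd data 2).getD i [] = PySem.List.slice (PySem.List.pyGetD data i []) (some 6) (some 9) := by
  rw [mkd_eq]
  have hmem : ((i, PySem.List.slice (PySem.List.pyGetD data i []) (some ((2:Int) * 3)) (some (((2:Int) + 1) * 3))) : Int × List Int)
      ∈ (PySem.List.enumerate data).map
        (fun p => (p.1, PySem.List.slice p.2 (some ((2:Int) * 3)) (some (((2:Int) + 1) * 3)))) :=
    List.mem_map_of_mem (mem_enumerate_rowOf data i h0 hn)
  have hnd : (PySem.Dict.mk ((PySem.List.enumerate data).map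
      (fun p => (p.1, PySem.List.slice p.2 (some ((2:Int) * 3)) (some (((2:Int) + 1) * 3)))))).keys.Nodup := by
    have := keys_mkd_nodup data 2
    rwa [mkd_eq] at this
  have := PySem.Dict.getD_of_mem_items _ hmem hnd ([] : List Int)
  rw [this]
  norm_num

-- one simulated tick preserves the simulation relation
theorem tick_sim (data : List (List Int)) (hrows : ∀ row ∈ data, 9 ≤ row.length)
    (t : Int) (alive : List Int)
    (s : PySem.Dict Int (List Int) × PySem.Dict Int (List Int))
    (h : SimInv data t alive s) :
    SimInv data (t + 1) (tickB data t alive) (tickA (mkd data 2) s) := by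
  obtain ⟨hnd, hbd, h1, h2⟩ := h
  have hrow9 : ∀ i ∈ alive, 9 ≤ (PySem.List.pyGetD data i []).length := fun i hi =>
    hrows _ (rowOf_mem data i (hbd i hi).1 (hbd i hi).2)
  have hPdef : ∀ (u i : Int), positionAt (PySem.List.pyGetD data i []) u = Pfun data u i :=
    fun _ _ => rfl
  have hVdef : ∀ (u i : Int), velA (PySem.List.pyGetD data i []) u = Vfun data u i :=
    fun _ _ => rfl
  unfold tickA tickB
  rw [h1, h2]
  simp only [PySem.Dict.values_mk, List.map_map, Function.comp_def, hPdef, contains_collisions]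
  set xs := alive.map (fun i => Pfun data t i) with hxs
  set pb := fun i => ((PySem.Dict.counter (alive.map (fun i => Pfun data t i))).getD
      (Pfun data t i) 0 == 1) with hpb
  set surv := alive.filter pb with hsurv
  have hcnt : ∀ i ∈ alive, (!decide (1 < xs.count (Pfun data t i))) = pb i := by
    intro i hi
    have hposc : 0 < xs.count (Pfun data t i) :=
      List.count_pos_iff.mpr (by rw [hxs]; exact List.mem_map_of_mem hi)
    rw [hpb]
    simp only [PySem.Dict.getD_counter, ← hxs]
    by_cases hone : 1 < xs.count (Pfun data t i)
    · rw [decide_eq_true hone, Bool.not_true]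
      exact (beq_eq_false_iff_ne.mpr (by exact_mod_cast (by omega : ¬ xs.count (Pfun data t i) = 1))).symm
    · have hc1 : xs.count (Pfun data t i) = 1 := by omega
      rw [decide_eq_false hone, Bool.not_false, hc1]
      exact (beq_iff_eq.mpr rfl).symm
  have hsnd : surv.Nodup := hnd.filter pb
  have hndp : ((alive.map (fun i => (i, Pfun data t i))).map Prod.fst).Nodup := by
    rw [List.map_map]; simpa [Function.comp_def] using hnd
  have hndv : ((alive.map (fun i => (i, Vfun data t i))).map Prod.fst).Nodup := by
    rw [List.map_map]; simpa [Function.comp_def] using hnd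
  have hpos1 : (alive.map (fun i => (i, Pfun data t i))).foldl
      (fun d p => if decide (1 < xs.count p.2) = true then d else d.insert p.1 p.2)
      (PySem.Dict.mk [])
      = PySem.Dict.mk (surv.map (fun i => (i, Pfun data t i))) := by
    have hflip : (fun (d : PySem.Dict Int (List Int)) (p : Int × List Int) =>
        if decide (1 < xs.count p.2) = true then d else d.insert p.1 p.2)
        = (fun d p => if (fun p : Int × List Int => !decide (1 < xs.count p.2)) p = true
            then d.insert p.1 p.2 else d) := by
      funext d p
      by_cases hc : decide (1 < xs.count p.2) = true <;> simp [hc]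
    rw [hflip, foldl_insert_keyed (fun p : Int × List Int => p.1)
      (fun p : Int × List Int => p.2) _ _ [] (by simp) hndp, List.filter_map]
    simp only [List.nil_append, List.map_map, Function.comp_def]
    rw [List.filter_congr (fun i him => hcnt i him)]
  rw [hpos1]
  have hkeys : (PySem.Dict.mk (surv.map (fun i => (i, Pfun data t i)))).keys = surv := by
    rw [PySem.Dict.keys_mk, List.map_map]
    simp [Function.comp_def]
  have hcont : ∀ i ∈ alive,
      (PySem.Dict.mk (surv.map (fun i => (i, Pfun data t i)))).contains i = pb i := by
    intro i hi
    rw [PySem.Dict.contains_eq_decide_mem_keys, hkeys]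
    by_cases hpbq : pb i = true
    · rw [hpbq]
      exact decide_eq_true (List.mem_filter.mpr ⟨hi, hpbq⟩)
    · rw [Bool.eq_false_iff.mpr hpbq]
      exact decide_eq_false (fun hmm => hpbq (List.mem_filter.mp hmm).2)
  have hvel1 : (alive.map (fun i => (i, Vfun data t i))).foldl
      (fun d p => if (PySem.Dict.mk (surv.map (fun i => (i, Pfun data t i)))).contains p.1 = true
        then d.insert p.1 p.2 else d) (PySem.Dict.mk [])
      = PySem.Dict.mk (surv.map (fun i => (i, Vfun data t i))) := by
    rw [foldl_insert_keyed (fun p : Int × List Int => p.1) (fun p : Int × List Int => p.2)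
      (fun p : Int × List Int => (PySem.Dict.mk (surv.map (fun i => (i, Pfun data t i)))).contains p.1)
      _ [] (by simp) hndv, List.filter_map]
    simp only [List.nil_append, List.map_map, Function.comp_def]
    rw [List.filter_congr (fun i him => hcont i him)]
  rw [hvel1, hkeys]
  have hgetDv : ∀ i ∈ surv,
      (PySem.Dict.mk (surv.map (fun i => (i, Vfun data t i)))).getD i [] = Vfun data t i := by
    intro i hi
    refine PySem.Dict.getD_of_mem_items _
      (List.mem_map_of_mem (f := fun i => ((i, Vfun data t i) : Int × List Int)) hi) ?_ []
    rw [PySem.Dict.keys_mk, List.map_map]; simpa [Function.comp_def] using hsnd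
  have hgetDp : ∀ i ∈ surv,
      (PySem.Dict.mk (surv.map (fun i => (i, Pfun data t i)))).getD i [] = Pfun data t i := by
    intro i hi
    refine PySem.Dict.getD_of_mem_items _
      (List.mem_map_of_mem (f := fun i => ((i, Pfun data t i) : Int × List Int)) hi) ?_ []
    rw [PySem.Dict.keys_mk, List.map_map]; simpa [Function.comp_def] using hsnd
  have hvel2 : surv.foldl
      (fun d idx => d.insert idx ((PySem.List.pyRange 0 3 1).map
        (fun dim => PySem.List.pyGetD ((PySem.Dict.mk (surv.map (fun i => (i, Vfun data t i)))).getD idx []) dim 0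
          + PySem.List.pyGetD ((mkd data 2).getD idx []) dim 0)))
      (PySem.Dict.mk [])
      = PySem.Dict.mk (surv.map (fun i => (i, Vfun data (t + 1) i))) := by
    rw [foldl_insert_all (fun k : Int => k) _ _ (by simpa using hsnd)]
    refine congrArg PySem.Dict.mk (List.map_congr_left ?_)
    intro i hi
    have hib : i ∈ alive := List.mem_of_mem_filter hi
    rw [hgetDv i hi, acc_getD data i (hbd i hib).1 (hbd i hib).2]
    rw [show Vfun data t i = velA (PySem.List.pyGetD data i []) t from rfl,
      vel_step _ (hrow9 i hib) t]
    rfl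
  rw [hvel2]
  have hgetDv2 : ∀ i ∈ surv,
      (PySem.Dict.mk (surv.map (fun i => (i, Vfun data (t + 1) i)))).getD i [] =
        Vfun data (t + 1) i := by
    intro i hi
    refine PySem.Dict.getD_of_mem_items _
      (List.mem_map_of_mem (f := fun i => ((i, Vfun data (t + 1) i) : Int × List Int)) hi) ?_ []
    rw [PySem.Dict.keys_mk, List.map_map]; simpa [Function.comp_def] using hsnd
  have hpos2 : surv.foldl
      (fun d idx => d.insert idx ((PySem.List.pyRange 0 3 1).map
        (fun dim => PySem.List.pyGetD ((PySem.Dict.mk (surv.map (fun i => (i, Pfun data t i)))).getD idx []) dim 0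
          + PySem.List.pyGetD
              ((PySem.Dict.mk (surv.map (fun i => (i, Vfun data (t + 1) i)))).getD idx []) dim 0)))
      (PySem.Dict.mk [])
      = PySem.Dict.mk (surv.map (fun i => (i, Pfun data (t + 1) i))) := by
    rw [foldl_insert_all (fun k : Int => k) _ _ (by simpa using hsnd)]
    refine congrArg PySem.Dict.mk (List.map_congr_left ?_)
    intro i hi
    have hib : i ∈ alive := List.mem_of_mem_filter hi
    rw [hgetDp i hi, hgetDv2 i hi]
    rw [show Pfun data t i = positionAt (PySem.List.pyGetD data i []) t from rfl,
      show Vfun data (t + 1) i = velA (PySem.List.pyGetD data i []) (t + 1) from rfl,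
      pos_step _ (hrow9 i hib) t]
    rfl
  rw [hpos2]
  exact ⟨hsnd, fun i hi => hbd i (List.mem_of_mem_filter hi), rfl, rfl⟩

-- running both loops in lockstep preserves the relation
theorem sim_run (data : List (List Int)) (hrows : ∀ row ∈ data, 9 ≤ row.length) (n : Nat) :
    ∀ (t0 : Int) (alive : List Int)
      (s : PySem.Dict Int (List Int) × PySem.Dict Int (List Int)),
      SimInv data t0 alive s →
      SimInv data (t0 + n)
        ((PySem.List.pyRange t0 (t0 + n) 1).foldl (fun al t => tickB data t al) alive)
        ((PySem.List.pyRange t0 (t0 + n) 1).foldl (fun s _ => tickA (mkd data 2) s) s) := by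
  induction n with
  | zero =>
    intro t0 alive s h
    rw [PySem.List.pyRange_one_eq_nil (by omega)]
    simpa using h
  | succ n ih =>
    intro t0 alive s h
    rw [PySem.List.pyRange_one_cons (by push_cast; omega)]
    simp only [List.foldl_cons]
    have hstep := tick_sim data hrows t0 alive s h
    have := ih (t0 + 1) _ _ hstep
    have heq : t0 + 1 + (n : Int) = t0 + ((n + 1 : Nat) : Int) := by push_cast; ring
    rwa [heq] at this

-- the full equivalence on Pre_
theorem solve_spec' (data : List (List Int)) (part : Int)
    (hpre : Pre_solve data part) : solve data part = solve_alt data part := by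
  unfold solve solve_alt
  rcases hpre with ⟨hp1, hne⟩ | ⟨hp2, hrows⟩
  · -- part 1: no ticks, minimum of the (|acc|, |vel|, idx) triples
    subst hp1
    simp only [show ((1:Int) = 2) = False by simp, if_true, if_false]
    rw [show PySem.List.pyRange 0 0 1 = ([] : List Int) from rfl]
    simp only [List.foldl_nil]
    have hkeys0 : (mkd data 0).keys = (PySem.List.enumerate data).map (·.1) := by
      rw [mkd_eq, PySem.Dict.keys_mk, List.map_map]; rfl
    have hgetD : ∀ (i : Int), ∀ p ∈ PySem.List.enumerate data,
        (mkd data i).getD p.1 [] = PySem.List.slice p.2 (some (i * 3)) (some ((i + 1) * 3)) := by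
      intro i p hp
      rw [mkd_eq]
      refine PySem.Dict.getD_of_mem_items _
        (List.mem_map_of_mem
          (f := fun p : Int × List Int =>
            ((p.1, PySem.List.slice p.2 (some (i * 3)) (some ((i + 1) * 3))) : Int × List Int)) hp)
        ?_ []
      have := keys_mkd_nodup data i
      rwa [mkd_eq] at this
    have hAB : ((mkd data 0).keys.map
        (fun idx => (distance ((mkd data 2).getD idx []), distance ((mkd data 1).getD idx []), idx)))
        = (PySem.List.enumerate data).map (fun p : Int × List Int =>
            (manhattan (PySem.List.slice p.2 (some 6) (some 9)),
             manhattan (PySem.List.slice p.2 (some 3) (some 6)), p.1)) := by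
      rw [hkeys0, List.map_map]
      refine List.map_congr_left ?_
      intro p hp
      show (distance ((mkd data 2).getD p.1 []), distance ((mkd data 1).getD p.1 []), p.1)
        = (manhattan (PySem.List.slice p.2 (some 6) (some 9)),
           manhattan (PySem.List.slice p.2 (some 3) (some 6)), p.1)
      rw [hgetD 2 p hp, hgetD 1 p hp]
      norm_num
      exact ⟨rfl, rfl⟩
    rw [hAB]
    cases data with
    | nil => exact absurd rfl hne
    | cons d rest =>
      rw [show PySem.List.enumerate (d :: rest) = (0, d) :: PySem.List.enumerate rest 1 from
        PySem.List.enumerate_cons ..]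
      exact congrArg (fun z : Int × Int × Int => z.2.2) (sort_head_eq_min _ _)
  · -- part 2: 100 collision ticks, then the live-particle count
    subst hp2
    simp only [show ((2:Int) = 1) = False by simp, if_true, if_false]
    have hinv0 : SimInv data 0 (PySem.List.pyRange 0 (data.length : Int) 1)
        (mkd data 0, mkd data 1) := by
      refine ⟨PySem.List.nodup_pyRange_one _ _, ?_, ?_, ?_⟩
      · intro i hi
        have := PySem.List.mem_pyRange_one.mp hi
        omega
      · show mkd data 0 = _
        rw [mkd_eq, PySem.List.enumerate_eq_map_pyRange data ([] : List Int), List.map_map,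
          show PySem.List.len data = (data.length : Int) from rfl]
        refine congrArg PySem.Dict.mk (List.map_congr_left ?_)
        intro i hi
        obtain ⟨h0, hn⟩ := PySem.List.mem_pyRange_one.mp hi
        obtain ⟨r0, r1, r2, r3, r4, r5, r6, r7, r8, rest, hrow⟩ :=
          exists_nine (PySem.List.pyGetD data i []) (hrows _ (rowOf_mem data i h0 hn))
        show ((i, PySem.List.slice (PySem.List.pyGetD data i []) (some ((0:Int) * 3)) (some (((0:Int) + 1) * 3))) : Int × List Int)
          = (i, Pfun data 0 i)
        rw [show Pfun data 0 i = positionAt (PySem.List.pyGetD data i []) 0 from rfl, hrow,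
          positionAt_nine, show ((0:Int) * 3) = 0 by norm_num,
          show (((0:Int) + 1) * 3) = 3 by norm_num,
          (slice_nine r0 r1 r2 r3 r4 r5 r6 r7 r8 rest).1]
        norm_num [PySem.Int.floordiv]
      · show mkd data 1 = _
        rw [mkd_eq, PySem.List.enumerate_eq_map_pyRange data ([] : List Int), List.map_map,
          show PySem.List.len data = (data.length : Int) from rfl]
        refine congrArg PySem.Dict.mk (List.map_congr_left ?_)
        intro i hi
        obtain ⟨h0, hn⟩ := PySem.List.mem_pyRange_one.mp hi
        obtain ⟨r0, r1, r2, r3, r4, r5, r6, r7, r8, rest, hrow⟩ :=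
          exists_nine (PySem.List.pyGetD data i []) (hrows _ (rowOf_mem data i h0 hn))
        show ((i, PySem.List.slice (PySem.List.pyGetD data i []) (some ((1:Int) * 3)) (some (((1:Int) + 1) * 3))) : Int × List Int)
          = (i, Vfun data 0 i)
        rw [show Vfun data 0 i = velA (PySem.List.pyGetD data i []) 0 from rfl, hrow,
          velA_nine, show ((1:Int) * 3) = 3 by norm_num,
          show (((1:Int) + 1) * 3) = 6 by norm_num,
          (slice_nine r0 r1 r2 r3 r4 r5 r6 r7 r8 rest).2.1]
        norm_num
    have h100 := sim_run data hrows 100 0 _ _ hinv0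
    rw [show ((0:Int) + ((100 : Nat) : Int)) = 100 by norm_num] at h100
    obtain ⟨_, _, hh1, _⟩ := h100
    have hsz : ∀ (L : List Int),
        ((PySem.Dict.mk (L.map (fun i => (i, Pfun data 100 i)))).size : Int)
          = (L.length : Int) := by
      intro L; simp [PySem.Dict.size]
    rw [hh1]
    exact hsz _

-- ===== VERDICT (by name: the statement is the Claim_ definition above) =====
theorem solve_spec : Claim_equal_solve := by
  intro data part _ hpre
  unfold Spec_solve
  exact solve_spec' data part hpre
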